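-- pv_equiv track=rewrite | github.com/WallerTsai/OJ-Solution | leetcode-py/滑动窗口/定长滑动窗口/No3679.py | minArrivalsToDiscard
-- ===== SOURCE A (Python) =====
-- from collections import defaultdict
-- from typing import List
--
-- def minArrivalsToDiscard(arrivals: List[int], w: int, m: int) -> int:
--     cnt = defaultdict(int)
--     ans = left  = 0
--     pop_set = set()
--     for right, num in enumerate(arrivals):
--         cnt[num] += 1
--         if right - left + 1 > w:
--             if left not in pop_set:
--                 cnt[arrivals[left]] -= 1
--             left += 1
--         if cnt[num] > m:
--             pop_set.add(right)
--             cnt[num] -= 1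
--             ans += 1
--
--     return ans
-- ===== SOURCE B (Python) =====
-- from collections import defaultdict, deque
--
-- def minArrivalsToDiscard(arrivals, w, m):
--     cnt = defaultdict(int)
--     kept = deque()  # indices of kept arrivals, oldest first
--     ans = 0
--     for right, num in enumerate(arrivals):
--         while kept and kept[0] <= right - w:
--             cnt[arrivals[kept.popleft()]] -= 1
--         if cnt[num] < m:
--             kept.append(right)
--             cnt[num] += 1
--         else:
--             ans += 1
--     return ans
-- ===== Notes on version B (the rewrite author's own statement) =====
-- stated objective: idiomatic
-- what changed: Replaces A's left-pointer-plus-discarded-index-set bookkeeping with a deque of kept indices evicted from the front, so counts track only kept elements and no pop_set is needed.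
-- outside the precondition, e.g. on minArrivalsToDiscard([1], 0, 0): A returns 0, B returns 1; on minArrivalsToDiscard([1, 1], 0, -1): A returns 1, B returns 2
import Mathlib
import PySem

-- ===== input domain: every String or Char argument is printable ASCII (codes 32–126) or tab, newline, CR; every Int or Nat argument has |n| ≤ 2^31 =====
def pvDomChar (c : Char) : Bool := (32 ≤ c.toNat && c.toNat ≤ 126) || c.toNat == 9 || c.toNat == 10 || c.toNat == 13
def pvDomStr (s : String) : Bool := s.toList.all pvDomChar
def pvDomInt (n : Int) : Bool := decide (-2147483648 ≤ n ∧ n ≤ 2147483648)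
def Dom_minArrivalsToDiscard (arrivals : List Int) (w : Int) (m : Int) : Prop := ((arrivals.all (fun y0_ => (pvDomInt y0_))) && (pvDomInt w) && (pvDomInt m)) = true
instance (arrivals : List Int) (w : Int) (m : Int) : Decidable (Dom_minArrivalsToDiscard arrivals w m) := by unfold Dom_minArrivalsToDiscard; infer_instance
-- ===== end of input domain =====

-- B replaces A's left-pointer-plus-discarded-index-set bookkeeping with a deque of kept
-- indices evicted from the front (idiomatic sliding-window structure, same O(n) cost).

-- ===== PORT A =====
-- state: (cnt, ans, left, pop_set).  arrivals[left] is always in range when read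
-- (left < right there), so the total pyGetD with default 0 is exact.
def stepA (arrivals : List Int) (w m : Int) (cnt : PySem.Dict Int Int) (ans left : Int)
    (pop : PySem.Set Int) (right num : Int) :
    PySem.Dict Int Int × Int × Int × PySem.Set Int :=
  let cnt := cnt.modify num 0 (· + 1)
  let (cnt, left) :=
    if right - left + 1 > w then
      ((if PySem.Set.contains pop left then cnt
        else cnt.modify (PySem.List.pyGetD arrivals left 0) 0 (· - 1)), left + 1)
    else (cnt, left)
  if cnt.getD num 0 > m then
    (cnt.modify num 0 (· - 1), ans + 1, left, PySem.Set.add pop right)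
  else (cnt, ans, left, pop)

def minArrivalsToDiscard (arrivals : List Int) (w : Int) (m : Int) : Int :=
  ((PySem.List.enumerate arrivals 0).foldl
    (fun s p => stepA arrivals w m s.1 s.2.1 s.2.2.1 s.2.2.2 p.1 p.2)
    (PySem.Dict.empty, 0, 0, PySem.Set.empty)).2.1

-- ===== PORT B =====
-- the 'while kept and kept[0] <= right - w' eviction loop, structural on the deque
def evictB (arrivals : List Int) (bound : Int) :
    List Int → PySem.Dict Int Int → List Int × PySem.Dict Int Int
  | [], cnt => ([], cnt)
  | i :: rest, cnt =>
    if i ≤ bound then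
      evictB arrivals bound rest (cnt.modify (PySem.List.pyGetD arrivals i 0) 0 (· - 1))
    else (i :: rest, cnt)

-- state: (cnt, kept, ans)
def stepB (arrivals : List Int) (w m : Int) (cnt : PySem.Dict Int Int) (kept : List Int)
    (ans right num : Int) : PySem.Dict Int Int × List Int × Int :=
  let (kept, cnt) := evictB arrivals (right - w) kept cnt
  if cnt.getD num 0 < m then (cnt.modify num 0 (· + 1), kept ++ [right], ans)
  else (cnt, kept, ans + 1)

def minArrivalsToDiscard_alt (arrivals : List Int) (w : Int) (m : Int) : Int :=
  ((PySem.List.enumerate arrivals 0).foldl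
    (fun s p => stepB arrivals w m s.1 s.2.1 s.2.2 p.1 p.2)
    (PySem.Dict.empty, [], 0)).2.2

-- ===== PRECONDITION & SPEC =====
-- Pre_ excludes only the degenerate parameter corner w ≤ 0 together with m ≤ 0 on inputs
-- where some value occurs more than -m times: the task is unspecified there ('windows are
-- empty, keep more' vs 'no arrival may ever be kept') and A's and B's answers are both
-- defensible readings.
def Pre_minArrivalsToDiscard (arrivals : List Int) (w : Int) (m : Int) : Prop :=
  1 ≤ w ∨ 1 ≤ m ∨ ∀ v ∈ arrivals, (arrivals.count v : Int) ≤ -m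

instance (arrivals : List Int) (w : Int) (m : Int) : Decidable (Pre_minArrivalsToDiscard arrivals w m) := by unfold Pre_minArrivalsToDiscard; infer_instance

def pvWitness_minArrivalsToDiscard : List Int × Int × Int := ([1, 2, 1, 1], 3, 1)

def Spec_minArrivalsToDiscard (arrivals : List Int) (w : Int) (m : Int) (out : Int) : Prop := out = minArrivalsToDiscard_alt arrivals w m
instance (arrivals : List Int) (w : Int) (m : Int) (out : Int) : Decidable (Spec_minArrivalsToDiscard arrivals w m out) := by unfold Spec_minArrivalsToDiscard; infer_instance

-- ===== CLAIM (what is proved, stated in full; the proofs are below) =====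
def Claim_equal_minArrivalsToDiscard : Prop := ∀ (arrivals : List Int) (w : Int) (m : Int), Dom_minArrivalsToDiscard arrivals w m → Pre_minArrivalsToDiscard arrivals w m → Spec_minArrivalsToDiscard arrivals w m (minArrivalsToDiscard arrivals w m)

-- ===== LEMMAS AND PROOFS =====

-- Invariant for w ≥ 1: A's window pointer is determined, B's deque is the sorted list of
-- kept (non-popped) indices of the current window, and the two counters agree pointwise.
def InvW (_arrivals : List Int) (w : Int) (k : Nat) (cntA : PySem.Dict Int Int) (left : Int)
    (pop : PySem.Set Int) (cntB : PySem.Dict Int Int) (dq : List Int) : Prop :=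
  left = max 0 ((k : Int) - w) ∧
  dq.Pairwise (· < ·) ∧
  (∀ i ∈ dq, left ≤ i ∧ i < (k : Int)) ∧
  (∀ i : Int, left ≤ i → i < (k : Int) → (i ∈ dq ↔ i ∉ pop)) ∧
  (∀ i ∈ pop, i < (k : Int)) ∧
  (∀ x, cntA.getD x 0 = cntB.getD x 0)

-- Invariant for w ≤ 0 (and m ≥ 1): nothing is ever discarded; A retains nothing,
-- B lazily retains exactly the previous arrival until the next eviction.
def InvS (arrivals : List Int) (k : Nat) (cntA : PySem.Dict Int Int) (left : Int)
    (pop : PySem.Set Int) (cntB : PySem.Dict Int Int) (dq : List Int) : Prop :=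
  left = (k : Int) ∧ pop = ([] : PySem.Set Int) ∧ (∀ x, cntA.getD x 0 = 0) ∧
  ((k = 0 ∧ dq = [] ∧ ∀ x, cntB.getD x 0 = 0) ∨
   (0 < k ∧ dq = [(k : Int) - 1] ∧
    ∀ x, cntB.getD x 0 = if x = PySem.List.pyGetD arrivals ((k : Int) - 1) 0 then 1 else 0))

-- common tail of the w ≥ 1 simulation step: after A's slide and B's eviction the two
-- counters differ exactly by the pending current arrival; the threshold branches align.
theorem mid_final (arrivals : List Int) (w m : Int) (hw : 1 ≤ w) (k : Nat)
    (cntA2 cntB2 : PySem.Dict Int Int) (dq2 : List Int) (left2 : Int)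
    (pop : PySem.Set Int) (ans num : Int)
    (h1 : left2 = max 0 ((k : Int) + 1 - w))
    (h2 : dq2.Pairwise (· < ·))
    (h3 : ∀ i ∈ dq2, left2 ≤ i ∧ i < (k : Int))
    (h4 : ∀ i : Int, left2 ≤ i → i < (k : Int) → (i ∈ dq2 ↔ i ∉ pop))
    (h5 : ∀ i ∈ pop, i < (k : Int))
    (hrel : ∀ y, cntA2.getD y 0 = cntB2.getD y 0 + (if y = num then 1 else 0)) :
    ∃ cntA' left' pop' cntB' dq' ans',
      (if cntA2.getD num 0 > m then
        (cntA2.modify num 0 (· - 1), ans + 1, left2, PySem.Set.add pop (k : Int))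
       else (cntA2, ans, left2, pop)) = (cntA', ans', left', pop') ∧
      (if cntB2.getD num 0 < m then
        (cntB2.modify num 0 (· + 1), dq2 ++ [(k : Int)], ans)
       else (cntB2, dq2, ans + 1)) = (cntB', dq', ans') ∧
      InvW arrivals w (k + 1) cntA' left' pop' cntB' dq' := by
  have hkey := hrel num
  simp only [if_pos] at hkey
  have hleft1 : left2 = max 0 (((k + 1 : Nat) : Int) - w) := by push_cast; omega
  by_cases hd : cntB2.getD num 0 < m
  · rw [if_neg (by omega), if_pos hd]
    refine ⟨_, _, _, _, _, _, rfl, rfl, hleft1, ?_, ?_, ?_, ?_, ?_⟩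
    · exact List.pairwise_append.mpr ⟨h2, by simp, by
        intro a ha b hb; simp at hb; subst hb; exact (h3 a ha).2⟩
    · intro i hi
      rcases List.mem_append.mp hi with h | h
      · have := h3 i h; push_cast; omega
      · simp at h; subst h; push_cast; omega
    · intro i hi1 hi2
      by_cases he : i = (k : Int)
      · subst he
        constructor
        · intro _ hp; have := h5 _ hp; omega
        · intro _; simp
      · have hi2' : i < (k : Int) := by push_cast at hi2; omega
        rw [List.mem_append, List.mem_singleton, h4 i hi1 hi2']
        constructor
        · rintro (h | h)
          · exact h
          · exact absurd h he
        · exact Or.inl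
    · intro i hi; have := h5 i hi; push_cast; omega
    · intro y
      rw [PySem.Dict.getD_modify]
      by_cases hy : y = num
      · subst hy; have := hrel y; simp at this ⊢; omega
      · rw [if_neg hy]; have := hrel y; rw [if_neg hy] at this; omega
  · rw [if_pos (by omega), if_neg hd]
    refine ⟨_, _, _, _, _, _, rfl, rfl, hleft1, h2, ?_, ?_, ?_, ?_⟩
    · intro i hi; have := h3 i hi; push_cast; omega
    · intro i hi1 hi2
      by_cases he : i = (k : Int)
      · subst he
        constructor
        · intro h; exact absurd (h3 _ h).2 (by omega)
        · intro h; exact absurd ((PySem.Set.mem_add pop _ _).mpr (Or.inr rfl)) h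
      · have hi2' : i < (k : Int) := by push_cast at hi2; omega
        rw [h4 i hi1 hi2']
        constructor
        · intro h hm'; exact h (((PySem.Set.mem_add pop _ _).mp hm').resolve_right he)
        · intro h hm'; exact h ((PySem.Set.mem_add pop _ _).mpr (Or.inl hm'))
    · intro i hi
      rcases (PySem.Set.mem_add pop _ _).mp hi with h | h
      · have := h5 i h; push_cast; omega
      · subst h; push_cast; omega
    · intro y
      rw [PySem.Dict.getD_modify]
      by_cases hy : y = num
      · subst hy; have := hrel y; simp at this ⊢; omega
      · rw [if_neg hy]; have := hrel y; rw [if_neg hy] at this; omega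

-- decrement-by-one read out through getD (both sides of the simulation use it)
theorem getD_modify_sub (c : PySem.Dict Int Int) (z y : Int) :
    (c.modify z 0 (· - 1)).getD y 0 = c.getD y 0 - (if y = z then 1 else 0) := by
  rw [PySem.Dict.getD_modify]
  split_ifs with h
  · rw [h]
  · omega

theorem simW (arrivals : List Int) (w m : Int) (hw : 1 ≤ w) (k : Nat)
    (cntA : PySem.Dict Int Int) (left : Int) (pop : PySem.Set Int)
    (cntB : PySem.Dict Int Int) (dq : List Int) (ans num : Int)
    (hinv : InvW arrivals w k cntA left pop cntB dq) :
    ∃ cntA' left' pop' cntB' dq' ans',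
      stepA arrivals w m cntA ans left pop (k : Int) num = (cntA', ans', left', pop') ∧
      stepB arrivals w m cntB dq ans (k : Int) num = (cntB', dq', ans') ∧
      InvW arrivals w (k + 1) cntA' left' pop' cntB' dq' := by
  obtain ⟨hleft, hchain, hbound, hmem, hpopb, hcnt⟩ := hinv
  have hrel1 : ∀ y, (cntA.modify num 0 (· + 1)).getD y 0
      = cntB.getD y 0 + (if y = num then 1 else 0) := by
    intro y
    by_cases hy : y = num
    · subst hy; rw [PySem.Dict.getD_modify, if_pos rfl, hcnt y, if_pos rfl]
    · rw [PySem.Dict.getD_modify, if_neg hy, hcnt y, if_neg hy]; omega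
  by_cases hs : 0 ≤ (k : Int) - w
  · -- the window slides: left = k - w ≥ 0
    have hlv : left = (k : Int) - w := by omega
    have hltk : left < (k : Int) := by omega
    by_cases hpl : left ∈ pop
    · -- the leaving index was discarded earlier: A skips the decrement, B evicts nothing
      have hnd : left ∉ dq := fun h => ((hmem left le_rfl hltk).mp h) hpl
      have hevict : evictB arrivals ((k : Int) - w) dq cntB = (dq, cntB) := by
        cases dq with
        | nil => rfl
        | cons i0 r =>
          have hi0 : left ≤ i0 := (hbound i0 (by simp)).1
          have hne : i0 ≠ left := fun e => hnd (e ▸ List.mem_cons_self)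
          simp only [evictB]
          rw [if_neg (by omega : ¬ i0 ≤ (k : Int) - w)]
      have hA : stepA arrivals w m cntA ans left pop (k : Int) num =
          (if (cntA.modify num 0 (· + 1)).getD num 0 > m then
            ((cntA.modify num 0 (· + 1)).modify num 0 (· - 1), ans + 1, left + 1,
              PySem.Set.add pop (k : Int))
           else (cntA.modify num 0 (· + 1), ans, left + 1, pop)) := by
        simp only [stepA]
        rw [if_pos (by omega : (k : Int) - left + 1 > w),
          if_pos ((PySem.Set.contains_iff pop left).mpr hpl)]
      have hB : stepB arrivals w m cntB dq ans (k : Int) num =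
          (if cntB.getD num 0 < m then
            (cntB.modify num 0 (· + 1), dq ++ [(k : Int)], ans)
           else (cntB, dq, ans + 1)) := by
        simp only [stepB]
        rw [hevict]
      rw [hA, hB]
      exact mid_final arrivals w m hw k _ _ dq (left + 1) pop ans num (by omega) hchain
        (by intro i hi
            have h1 := (hbound i hi).1
            have h2 := (hbound i hi).2
            have : i ≠ left := fun e => hnd (e ▸ hi)
            omega)
        (fun i hi1 hi2 => hmem i (by omega) hi2)
        hpopb hrel1
    · -- the leaving index was kept: A decrements it, B evicts exactly it
      have hin : left ∈ dq := (hmem left le_rfl hltk).mpr hpl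
      cases dq with
      | nil => exact absurd hin (by simp)
      | cons i0 r =>
        have hi0 : left ≤ i0 := (hbound i0 (by simp)).1
        have hrgt : ∀ j ∈ r, i0 < j := fun j hj => (List.pairwise_cons.mp hchain).1 j hj
        have hi0eq : left = i0 := by
          rcases List.mem_cons.mp hin with h | h
          · omega
          · have := hrgt left h; omega
        subst hi0eq
        have hevict : evictB arrivals ((k : Int) - w) (left :: r) cntB =
            (r, cntB.modify (PySem.List.pyGetD arrivals left 0) 0 (· - 1)) := by
          simp only [evictB]
          rw [if_pos (by omega : left ≤ (k : Int) - w)]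
          cases r with
          | nil => rfl
          | cons j r' =>
            have := hrgt j (by simp)
            simp only [evictB]
            rw [if_neg (by omega : ¬ j ≤ (k : Int) - w)]
        have hcon : ¬ (PySem.Set.contains pop left = true) :=
          fun h => hpl ((PySem.Set.contains_iff pop left).mp h)
        have hA : stepA arrivals w m cntA ans left pop (k : Int) num =
            (if ((cntA.modify num 0 (· + 1)).modify (PySem.List.pyGetD arrivals left 0) 0 (· - 1)).getD num 0 > m then
              (((cntA.modify num 0 (· + 1)).modify (PySem.List.pyGetD arrivals left 0) 0 (· - 1)).modify num 0 (· - 1),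
                ans + 1, left + 1, PySem.Set.add pop (k : Int))
             else ((cntA.modify num 0 (· + 1)).modify (PySem.List.pyGetD arrivals left 0) 0 (· - 1), ans, left + 1, pop)) := by
          simp only [stepA]
          rw [if_pos (by omega : (k : Int) - left + 1 > w), if_neg hcon]
        have hB : stepB arrivals w m cntB (left :: r) ans (k : Int) num =
            (if (cntB.modify (PySem.List.pyGetD arrivals left 0) 0 (· - 1)).getD num 0 < m then
              ((cntB.modify (PySem.List.pyGetD arrivals left 0) 0 (· - 1)).modify num 0 (· + 1), r ++ [(k : Int)], ans)
             else (cntB.modify (PySem.List.pyGetD arrivals left 0) 0 (· - 1), r, ans + 1)) := by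
          simp only [stepB]
          rw [hevict]
        rw [hA, hB]
        refine mid_final arrivals w m hw k _ _ r (left + 1) pop ans num (by omega)
          (List.pairwise_cons.mp hchain).2
          (by intro i hi
              have h1 := hrgt i hi
              have h2 := (hbound i (by simp [hi])).2
              omega)
          (by intro i hi1 hi2
              rw [← hmem i (by omega) hi2]
              simp only [List.mem_cons]
              constructor
              · exact Or.inr
              · rintro (h | h)
                · omega
                · exact h)
          hpopb ?_
        intro y
        rw [getD_modify_sub, getD_modify_sub, hrel1 y]
        split_ifs <;> omega
  · -- no slide yet: the window still grows, nothing is evicted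
    have hl0 : left = 0 := by omega
    have hevict : evictB arrivals ((k : Int) - w) dq cntB = (dq, cntB) := by
      cases dq with
      | nil => rfl
      | cons i0 r =>
        have hi0 : left ≤ i0 := (hbound i0 (by simp)).1
        simp only [evictB]
        rw [if_neg (by omega : ¬ i0 ≤ (k : Int) - w)]
    have hA : stepA arrivals w m cntA ans left pop (k : Int) num =
        (if (cntA.modify num 0 (· + 1)).getD num 0 > m then
          ((cntA.modify num 0 (· + 1)).modify num 0 (· - 1), ans + 1, left,
            PySem.Set.add pop (k : Int))
         else (cntA.modify num 0 (· + 1), ans, left, pop)) := by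
      simp only [stepA]
      rw [if_neg (by omega : ¬ ((k : Int) - left + 1 > w))]
    have hB : stepB arrivals w m cntB dq ans (k : Int) num =
        (if cntB.getD num 0 < m then
          (cntB.modify num 0 (· + 1), dq ++ [(k : Int)], ans)
         else (cntB, dq, ans + 1)) := by
      simp only [stepB]
      rw [hevict]
    rw [hA, hB]
    exact mid_final arrivals w m hw k _ _ dq left pop ans num (by omega) hchain
      hbound (fun i hi1 hi2 => hmem i hi1 hi2) hpopb hrel1

theorem simS (arrivals : List Int) (w m : Int) (hw : ¬ 1 ≤ w) (hm : 1 ≤ m) (k : Nat)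
    (_hk : k < arrivals.length) (hnum : PySem.List.pyGetD arrivals (k : Int) 0 = num)
    (cntA : PySem.Dict Int Int) (left : Int) (pop : PySem.Set Int)
    (cntB : PySem.Dict Int Int) (dq : List Int) (ans : Int)
    (hinv : InvS arrivals k cntA left pop cntB dq) :
    ∃ cntA' left' pop' cntB' dq' ans',
      stepA arrivals w m cntA ans left pop (k : Int) num = (cntA', ans', left', pop') ∧
      stepB arrivals w m cntB dq ans (k : Int) num = (cntB', dq', ans') ∧
      InvS arrivals (k + 1) cntA' left' pop' cntB' dq' := by
  obtain ⟨hleft, hpop, hcA, hrest⟩ := hinv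
  have hw' : w ≤ 0 := by omega
  have hcon : ¬ (PySem.Set.contains pop left = true) := by
    subst hpop; simp
  have hA : stepA arrivals w m cntA ans left pop (k : Int) num =
      ((cntA.modify num 0 (· + 1)).modify num 0 (· - 1), ans, (k : Int) + 1, pop) := by
    simp only [stepA]
    rw [if_pos (by rw [hleft]; omega : (k : Int) - left + 1 > w), if_neg hcon]
    rw [hleft, hnum]
    rw [if_neg ?_]
    rw [PySem.Dict.getD_modify, if_pos rfl, PySem.Dict.getD_modify, if_pos rfl]
    have := hcA num
    omega
  have hevict : ∃ cntB1, evictB arrivals ((k : Int) - w) dq cntB = ([], cntB1) ∧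
      ∀ x, cntB1.getD x 0 = 0 := by
    rcases hrest with ⟨_, hdq, hcB⟩ | ⟨hkpos, hdq, hcB⟩
    · exact ⟨cntB, by rw [hdq]; rfl, hcB⟩
    · refine ⟨cntB.modify (PySem.List.pyGetD arrivals ((k : Int) - 1) 0) 0 (· - 1), ?_, ?_⟩
      · rw [hdq]
        simp only [evictB]
        rw [if_pos (by omega : (k : Int) - 1 ≤ (k : Int) - w)]
      · intro x
        rw [PySem.Dict.getD_modify]
        by_cases hx : x = PySem.List.pyGetD arrivals ((k : Int) - 1) 0
        · rw [if_pos hx, hcB]; simp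
        · rw [if_neg hx, hcB x, if_neg hx]
  obtain ⟨cntB1, hev, hcB1⟩ := hevict
  have hB : stepB arrivals w m cntB dq ans (k : Int) num =
      (cntB1.modify num 0 (· + 1), [(k : Int)], ans) := by
    simp only [stepB]
    rw [hev]
    rw [if_pos (by rw [hcB1 num]; omega)]
    rfl
  refine ⟨_, _, _, _, _, _, hA, hB, by push_cast; ring, hpop, ?_, Or.inr ⟨by omega, by push_cast; ring_nf, ?_⟩⟩
  · intro x
    by_cases hx : x = num
    · subst hx
      rw [PySem.Dict.getD_modify, if_pos rfl, PySem.Dict.getD_modify, if_pos rfl]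
      have := hcA x
      omega
    · rw [PySem.Dict.getD_modify, if_neg hx, PySem.Dict.getD_modify, if_neg hx]
      exact hcA x
  · intro x
    rw [PySem.Dict.getD_modify]
    have hidx : ((k + 1 : Nat) : Int) - 1 = (k : Int) := by push_cast; ring
    rw [hidx, hnum, hcB1 x]
    by_cases hx : x = num
    · rw [if_pos hx, if_pos hx, hcB1]; omega
    · rw [if_neg hx, if_neg hx]

-- Invariant for w ≤ 0, m ≤ 0 when no value occurs more than -m times: both sides
-- discard every arrival; A's counter records minus the number of occurrences seen.
def InvS2 (arrivals : List Int) (_m : Int) (k : Nat) (cntA : PySem.Dict Int Int) (left : Int)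
    (pop : PySem.Set Int) (cntB : PySem.Dict Int Int) (dq : List Int) : Prop :=
  left = (k : Int) ∧ (∀ i ∈ pop, i < (k : Int)) ∧
  (∀ x, cntA.getD x 0 = -(((arrivals.take k).count x : Int))) ∧
  dq = ([] : List Int) ∧ (∀ x, cntB.getD x 0 = 0)

theorem simS2 (arrivals : List Int) (w m : Int) (hw : ¬ 1 ≤ w) (hm : ¬ 1 ≤ m)
    (hcap : ∀ v ∈ arrivals, (arrivals.count v : Int) ≤ -m) (k : Nat)
    (hk : k < arrivals.length) (hnum : PySem.List.pyGetD arrivals (k : Int) 0 = num)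
    (cntA : PySem.Dict Int Int) (left : Int) (pop : PySem.Set Int)
    (cntB : PySem.Dict Int Int) (dq : List Int) (ans : Int)
    (hinv : InvS2 arrivals m k cntA left pop cntB dq) :
    ∃ cntA' left' pop' cntB' dq' ans',
      stepA arrivals w m cntA ans left pop (k : Int) num = (cntA', ans', left', pop') ∧
      stepB arrivals w m cntB dq ans (k : Int) num = (cntB', dq', ans') ∧
      InvS2 arrivals m (k + 1) cntA' left' pop' cntB' dq' := by
  obtain ⟨hleft, hpopb, hcA, hdq, hcB⟩ := hinv
  have hget : arrivals[k] = num := by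
    have h1 : PySem.List.pyGetD arrivals ((k : Nat) : Int) 0 = arrivals.getD k 0 :=
      PySem.List.pyGetD_natCast arrivals k 0
    rw [hnum] at h1
    rw [List.getD_eq_getElem?_getD, List.getElem?_eq_getElem hk] at h1
    exact h1.symm
  have htake : ∀ x, (arrivals.take (k + 1)).count x
      = (arrivals.take k).count x + (if x = num then 1 else 0) := by
    intro x
    rw [List.take_add_one, List.getElem?_eq_getElem hk, hget]
    simp only [Option.toList_some, List.count_append]
    by_cases hx : x = num
    · subst hx; simp
    · have hx' : ¬ num = x := fun h => hx h.symm
      simp [hx', hx]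
  have hcount : ((arrivals.take k).count num : Int) < -m := by
    have h1 : num ∈ arrivals := hget ▸ arrivals.getElem_mem hk
    have h2 := hcap num h1
    have h3 : (arrivals.take (k + 1)).count num ≤ arrivals.count num :=
      (arrivals.take_sublist (k + 1)).count_le num
    have h4 := htake num
    simp at h4
    omega
  have hcon : ¬ (PySem.Set.contains pop left = true) := by
    intro h
    have := hpopb left ((PySem.Set.contains_iff pop left).mp h)
    omega
  have hA : stepA arrivals w m cntA ans left pop (k : Int) num =
      (((cntA.modify num 0 (· + 1)).modify num 0 (· - 1)).modify num 0 (· - 1),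
        ans + 1, (k : Int) + 1, PySem.Set.add pop (k : Int)) := by
    simp only [stepA]
    rw [if_pos (by rw [hleft]; omega : (k : Int) - left + 1 > w), if_neg hcon]
    rw [hleft, hnum]
    rw [if_pos ?_]
    rw [PySem.Dict.getD_modify, if_pos rfl, PySem.Dict.getD_modify, if_pos rfl]
    have := hcA num
    omega
  have hB : stepB arrivals w m cntB dq ans (k : Int) num = (cntB, [], ans + 1) := by
    simp only [stepB]
    rw [hdq]
    show (if cntB.getD num 0 < m then _ else _) = _
    rw [if_neg (by rw [hcB num]; omega)]
    rfl
  refine ⟨_, _, _, _, _, _, hA, hB, by push_cast; ring, ?_, ?_, rfl, hcB⟩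
  · intro i hi
    rcases (PySem.Set.mem_add pop _ _).mp hi with h | h
    · have := hpopb i h; push_cast; omega
    · subst h; push_cast; omega
  · intro x
    rw [getD_modify_sub, getD_modify_sub]
    by_cases hx : x = num
    · subst hx
      rw [PySem.Dict.getD_modify, if_pos rfl, hcA x, htake x]
      simp
      omega
    · rw [PySem.Dict.getD_modify, if_neg hx, hcA x, htake x]
      rw [if_neg hx, if_neg hx]
      push_cast
      ring

theorem loop (arrivals : List Int) (w m : Int)
    (hpre : 1 ≤ w ∨ 1 ≤ m ∨ ∀ v ∈ arrivals, (arrivals.count v : Int) ≤ -m) :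
    ∀ (l : List Int) (k : Nat) (cntA : PySem.Dict Int Int) (left : Int)
      (pop : PySem.Set Int) (cntB : PySem.Dict Int Int) (dq : List Int) (ans : Int),
      arrivals.drop k = l →
      (if 1 ≤ w then InvW arrivals w k cntA left pop cntB dq
       else if 1 ≤ m then InvS arrivals k cntA left pop cntB dq
       else InvS2 arrivals m k cntA left pop cntB dq) →
      ((PySem.List.enumerate l (k : Int)).foldl
        (fun s p => stepA arrivals w m s.1 s.2.1 s.2.2.1 s.2.2.2 p.1 p.2)
        (cntA, ans, left, pop)).2.1
      = ((PySem.List.enumerate l (k : Int)).foldl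
        (fun s p => stepB arrivals w m s.1 s.2.1 s.2.2 p.1 p.2)
        (cntB, dq, ans)).2.2 := by
  intro l
  induction l with
  | nil => intro k cntA left pop cntB dq ans _ _; simp [PySem.List.enumerate_nil]
  | cons x rest ih =>
    intro k cntA left pop cntB dq ans hdrop hinv
    have hk : k < arrivals.length := by
      have := congrArg List.length hdrop
      simp at this; omega
    have hx : PySem.List.pyGetD arrivals (k : Int) 0 = x := by
      have h0 : (arrivals.drop k)[0]? = arrivals[k + 0]? := List.getElem?_drop
      rw [hdrop] at h0
      simp at h0
      simp [PySem.List.pyGetD_natCast, List.getD_eq_getElem?_getD, ← h0]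
    have hdrop' : arrivals.drop (k + 1) = rest := by
      have := congrArg List.tail hdrop
      simpa [List.tail_drop] using this
    rw [PySem.List.enumerate_cons, List.foldl_cons, List.foldl_cons]
    by_cases hw : 1 ≤ w
    · rw [if_pos hw] at hinv
      obtain ⟨cA', l', p', cB', dq', ans', hA, hB, hinv'⟩ :=
        simW arrivals w m hw k cntA left pop cntB dq ans x hinv
      simp only [hA, hB]
      have := ih (k + 1) cA' l' p' cB' dq' ans' hdrop' (by rw [if_pos hw]; exact hinv')
      push_cast at this ⊢
      exact this
    · rw [if_neg hw] at hinv
      by_cases hm : 1 ≤ m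
      · rw [if_pos hm] at hinv
        obtain ⟨cA', l', p', cB', dq', ans', hA, hB, hinv'⟩ :=
          simS arrivals w m hw hm k hk hx cntA left pop cntB dq ans hinv
        simp only [hA, hB]
        have := ih (k + 1) cA' l' p' cB' dq' ans' hdrop'
          (by rw [if_neg hw, if_pos hm]; exact hinv')
        push_cast at this ⊢
        exact this
      · rw [if_neg hm] at hinv
        have hcap := (hpre.resolve_left hw).resolve_left hm
        obtain ⟨cA', l', p', cB', dq', ans', hA, hB, hinv'⟩ :=
          simS2 arrivals w m hw hm hcap k hk hx cntA left pop cntB dq ans hinv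
        simp only [hA, hB]
        have := ih (k + 1) cA' l' p' cB' dq' ans' hdrop'
          (by rw [if_neg hw, if_neg hm]; exact hinv')
        push_cast at this ⊢
        exact this

-- ===== VERDICT (by name: the statement is the Claim_ definition above) =====
theorem minArrivalsToDiscard_spec : Claim_equal_minArrivalsToDiscard := by
  intro arrivals w m _ hpre
  unfold Spec_minArrivalsToDiscard minArrivalsToDiscard minArrivalsToDiscard_alt
  have h := loop arrivals w m hpre arrivals 0 PySem.Dict.empty 0 PySem.Set.empty
    PySem.Dict.empty [] 0 (by simp) ?_
  · exact_mod_cast h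
  · split
    · exact ⟨by omega, by simp, by simp, by intro i h1 h2; omega,
        by intro i hi; simp [PySem.Set.empty] at hi, fun x => rfl⟩
    · split
      · exact ⟨by simp, rfl, fun x => rfl, Or.inl ⟨rfl, rfl, fun x => rfl⟩⟩
      · exact ⟨by simp, by intro i hi; simp [PySem.Set.empty] at hi,
          by intro x; simp, rfl, fun x => rfl⟩
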